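-- pv_equiv track=rewrite | github.com/LiveData-Inc/air-toolkit | src/air/services/pr_generator.py | _sanitize_branch_name
-- ===== SOURCE A (Python) =====
-- def _sanitize_branch_name(title: str) -> str:
--     """Convert title to valid git branch name.
--
--     Args:
--         title: PR title
--
--     Returns:
--         Sanitized branch name
--     """
--     # Convert to lowercase, replace spaces with hyphens
--     branch = title.lower().replace(" ", "-")
--
--     # Remove special characters
--     allowed_chars = set("abcdefghijklmnopqrstuvwxyz0123456789-_/")
--     branch = "".join(c for c in branch if c in allowed_chars)
--
--     # Remove consecutive hyphens
--     while "--" in branch: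
--         branch = branch.replace("--", "-")
--
--     # Trim hyphens from ends
--     branch = branch.strip("-")
--
--     # Limit length
--     if len(branch) > 50:
--         branch = branch[:50].rstrip("-")
--
--     # Add prefix
--     return f"air/{branch}"
-- ===== SOURCE B (Python) =====
-- def _sanitize_branch_name(title: str) -> str:
--     """Convert title to valid git branch name (single-pass re-implementation)."""
--     allowed = "abcdefghijklmnopqrstuvwxyz0123456789-_/"
--     out = []
--     for ch in title.lower():
--         if ch == " ":
--             ch = "-"
--         if ch not in allowed:
--             continue
--         if ch == "-" and out and out[-1] == "-":
--             continue
--         out.append(ch)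
--     branch = "".join(out).strip("-")
--     if len(branch) > 50:
--         branch = branch[:50].rstrip("-")
--     return f"air/{branch}"
-- ===== Notes on version B (the rewrite author's own statement) =====
-- stated objective: alternative
-- what changed: Replaces A's multi-stage pipeline (space substitution, filter comprehension, then repeated whole-string replace passes until no double hyphen remains) with a single stateful left-to-right pass that maps, filters and collapses hyphen runs at once.
import Mathlib
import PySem

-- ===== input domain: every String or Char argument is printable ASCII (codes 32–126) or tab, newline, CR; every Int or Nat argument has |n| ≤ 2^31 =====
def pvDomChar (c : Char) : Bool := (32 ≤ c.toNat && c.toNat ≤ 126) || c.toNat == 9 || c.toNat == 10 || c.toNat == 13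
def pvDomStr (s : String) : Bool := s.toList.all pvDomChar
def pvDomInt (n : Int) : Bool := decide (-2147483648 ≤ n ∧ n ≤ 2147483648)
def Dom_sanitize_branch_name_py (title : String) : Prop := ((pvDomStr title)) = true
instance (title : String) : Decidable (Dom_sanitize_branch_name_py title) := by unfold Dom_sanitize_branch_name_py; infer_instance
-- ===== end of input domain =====

-- B builds the branch in one stateful pass (map/filter/collapse fused) instead of A's
-- filter comprehension plus repeated double-hyphen replace rescans; same return value, no side effects.

-- ===== PORT A =====

-- What one replace("--","-") pass computes, as a structural recursion; needed to prove
-- termination of the port of A's `while "--" in branch` loop.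
def pvRep : List Char → List Char
  | [] => []
  | [c] => [c]
  | a :: b :: t => if a = '-' ∧ b = '-' then '-' :: pvRep t else a :: pvRep (b :: t)

lemma pvRep_go (fuel : Nat) : ∀ (l acc : List Char), l.length ≤ fuel →
    PySem.Chars.replace.go ['-', '-'] ['-'] fuel l acc = acc.reverse ++ pvRep l := by
  induction fuel with
  | zero =>
    intro l acc hl
    have : l = [] := List.eq_nil_of_length_eq_zero (Nat.le_zero.mp hl)
    subst this
    simp [PySem.Chars.replace.go, pvRep]
  | succ n ih =>
    intro l acc hl
    match l with
    | [] => simp [PySem.Chars.replace.go, pvRep]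
    | [c] =>
      rw [PySem.Chars.replace.go]
      have hpre : List.isPrefixOf ['-', '-'] [c] = false := by
        simp [List.isPrefixOf]
      rw [hpre]
      simp only [Bool.false_eq_true, if_false]
      rw [ih [] (c :: acc) (by simp)]
      simp [pvRep]
    | a :: b :: t =>
      rw [PySem.Chars.replace.go]
      by_cases hab : a = '-' ∧ b = '-'
      · obtain ⟨ha, hb⟩ := hab
        subst ha; subst hb
        have hpre : List.isPrefixOf ['-', '-'] ('-' :: '-' :: t) = true := by
          simp [List.isPrefixOf]
        rw [hpre]
        simp only [if_true]
        have hlen : t.length ≤ n := by simp at hl; omega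
        rw [show List.drop (['-', '-'] : List Char).length ('-' :: '-' :: t) = t from rfl]
        rw [ih t (['-'].reverse ++ acc) hlen]
        simp [pvRep]
      · have hpre : List.isPrefixOf ['-', '-'] (a :: b :: t) = false := by
          simp [List.isPrefixOf]
          intro h1 h2; exact hab ⟨h1.symm, h2.symm⟩
        rw [hpre]
        simp only [Bool.false_eq_true, if_false]
        have hlen : (b :: t).length ≤ n := by simp at hl ⊢; omega
        rw [ih (b :: t) (a :: acc) hlen]
        rw [pvRep]
        simp [hab]

lemma pvReplace_eq_pvRep (s : List Char) :
    PySem.Chars.replace s ['-', '-'] ['-'] = pvRep s := by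
  rw [PySem.Chars.replace]
  simp only [List.isEmpty_cons, Bool.false_eq_true, if_false]
  rw [pvRep_go s.length s [] (le_refl _)]
  simp

lemma pvRep_length_le (s : List Char) : (pvRep s).length ≤ s.length := by
  induction s using pvRep.induct with
  | case1 => simp [pvRep]
  | case2 c => simp [pvRep]
  | case3 a b t hab ih => simp [pvRep, hab]; omega
  | case4 a b t hab ih => simp [pvRep, hab] at ih ⊢; omega

lemma pvRep_length_lt (s : List Char) (h : ['-', '-'] <:+: s) :
    (pvRep s).length < s.length := by
  induction s using pvRep.induct with
  | case1 => simp at h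
  | case2 c =>
    have := h.length_le
    simp at this
  | case3 a b t hab ih =>
    obtain ⟨ha, hb⟩ := hab; subst ha; subst hb
    have := pvRep_length_le t
    simp [pvRep]
    omega
  | case4 a b t hab ih =>
    rcases List.infix_cons_iff.mp h with hpre | hinf
    · exfalso
      rcases hpre with ⟨r, hr⟩
      simp at hr
      exact hab ⟨hr.1.symm, hr.2.1.symm⟩
    · have := ih hinf
      simp [pvRep, hab] at this ⊢
      omega

-- Port of:  while "--" in branch: branch = branch.replace("--", "-")
def pvCollapseLoop (s : List Char) : List Char :=
  if PySem.Chars.isIn ['-', '-'] s = true then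
    pvCollapseLoop (PySem.Chars.replace s ['-', '-'] ['-'])
  else s
termination_by s.length
decreasing_by
  rename_i hin
  rw [pvReplace_eq_pvRep]
  exact pvRep_length_lt s ((PySem.Chars.isIn_iff_infix _ _).mp hin)

-- allowed_chars = set("abcdefghijklmnopqrstuvwxyz0123456789-_/")
def pvAllowedA : PySem.Set Char := PySem.Set.ofList "abcdefghijklmnopqrstuvwxyz0123456789-_/".toList

-- Port of str.rstrip("-") (right strip only; PySem.Chars.stripChars strips both ends) — exact.
def pvRstripHyphen (s : List Char) : List Char := (s.reverse.dropWhile (fun c => c = '-')).reverse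

def sanitize_branch_name_py (title : String) : String :=
  -- branch = title.lower().replace(" ", "-")
  let branch := PySem.Chars.replace (PySem.Chars.lower title.toList) [' '] ['-']
  -- branch = "".join(c for c in branch if c in allowed_chars)
  let branch := branch.filter (fun c => pvAllowedA.contains c)
  -- while "--" in branch: branch = branch.replace("--", "-")
  let branch := pvCollapseLoop branch
  -- branch = branch.strip("-")
  let branch := PySem.Chars.stripChars branch ['-']
  -- if len(branch) > 50: branch = branch[:50].rstrip("-")
  let branch := if branch.length > 50 then pvRstripHyphen (PySem.Chars.slice branch none (some 50)) else branch
  -- return f"air/{branch}"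
  String.ofList ("air/".toList ++ branch)

-- ===== PORT B =====

-- allowed = "abcdefghijklmnopqrstuvwxyz0123456789-_/"  (membership test on the string's chars)
def pvAllowedB : List Char := "abcdefghijklmnopqrstuvwxyz0123456789-_/".toList

-- loop body: map ' '→'-', `if ch not in allowed: continue`,
-- `if ch == "-" and out and out[-1] == "-": continue` (getLast? = some '-' encodes both tests), append
def pvStepB (acc : List Char) (ch : Char) : List Char :=
  let ch := if ch = ' ' then '-' else ch
  if pvAllowedB.contains ch = false then acc
  else if ch = '-' ∧ acc.getLast? = some '-' then acc
  else acc ++ [ch]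

def sanitize_branch_name_py_alt (title : String) : String :=
  -- for ch in title.lower(): …
  let out := (PySem.Chars.lower title.toList).foldl pvStepB []
  -- branch = "".join(out).strip("-")
  let branch := PySem.Chars.stripChars out ['-']
  -- if len(branch) > 50: branch = branch[:50].rstrip("-")
  let branch := if branch.length > 50 then pvRstripHyphen (PySem.Chars.slice branch none (some 50)) else branch
  -- return f"air/{branch}"
  String.ofList ("air/".toList ++ branch)

-- ===== PRECONDITION & SPEC =====
def Spec_sanitize_branch_name_py (title : String) (out : String) : Prop := out = sanitize_branch_name_py_alt title
instance (title : String) (out : String) : Decidable (Spec_sanitize_branch_name_py title out) := by unfold Spec_sanitize_branch_name_py; infer_instance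

-- ===== CLAIM (what is proved, stated in full; the proofs are below) =====
def Claim_equal_sanitize_branch_name_py : Prop := ∀ (title : String), Dom_sanitize_branch_name_py title → Spec_sanitize_branch_name_py title (sanitize_branch_name_py title)

-- ===== LEMMAS AND PROOFS =====

-- the collapsed form: one pass over the characters; flag = "previous kept char was '-'"
def pvCollapse : List Char → Bool → List Char
  | [], _ => []
  | c :: t, h => if c = '-' ∧ h = true then pvCollapse t h else c :: pvCollapse t (c == '-')

-- one replace("--","-") pass does not change the collapsed form
lemma pvCollapse_pvRep (s : List Char) : ∀ h, pvCollapse (pvRep s) h = pvCollapse s h := by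
  induction s using pvRep.induct with
  | case1 => intro h; simp [pvRep]
  | case2 c => intro h; simp [pvRep]
  | case3 a b t hab ih =>
    intro h
    obtain ⟨ha, hb⟩ := hab; subst ha; subst hb
    rw [pvRep, if_pos ⟨rfl, rfl⟩]
    cases h with
    | true =>
      rw [pvCollapse, if_pos ⟨rfl, rfl⟩]
      rw [show pvCollapse ('-' :: '-' :: t) true = pvCollapse ('-' :: t) true from
        by rw [pvCollapse, if_pos ⟨rfl, rfl⟩]]
      rw [show pvCollapse ('-' :: t) true = pvCollapse t true from
        by rw [pvCollapse, if_pos ⟨rfl, rfl⟩]]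
      exact ih true
    | false =>
      rw [pvCollapse, if_neg (by simp), pvCollapse, if_neg (by simp)]
      rw [show pvCollapse ('-' :: t) (('-' : Char) == '-') = pvCollapse t true from
        by rw [show (('-' : Char) == '-') = true from rfl, pvCollapse, if_pos ⟨rfl, rfl⟩]]
      rw [show (('-' : Char) == '-') = true from rfl]
      rw [ih true]
  | case4 a b t hab ih =>
    intro h
    rw [pvRep, if_neg hab]
    by_cases hc : a = '-' ∧ h = true
    · rw [pvCollapse, if_pos hc, pvCollapse, if_pos hc]
      exact ih h
    · rw [pvCollapse, if_neg hc, pvCollapse, if_neg hc, ih (a == '-')]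

-- a string with no "--" (and not starting with '-' when the flag is set) is already collapsed
lemma pvCollapse_id (s : List Char) : ∀ (h : Bool), ¬ ['-', '-'] <:+: s →
    (h = true → s.head? ≠ some '-') → pvCollapse s h = s := by
  induction s with
  | nil => intro h _ _; rfl
  | cons c t ih =>
    intro h hno hh
    have hnt : ¬ ['-', '-'] <:+: t := fun ht => hno (ht.trans (List.suffix_cons c t).isInfix)
    rw [pvCollapse]
    by_cases hc : c = '-' ∧ h = true
    · obtain ⟨hc1, hc2⟩ := hc
      subst hc1
      exact absurd (by simp : (('-' :: t).head? = some '-')) (hh hc2)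
    · rw [if_neg hc]
      congr 1
      apply ih (c == '-') hnt
      intro hcb
      have hc' : c = '-' := by simpa using hcb
      subst hc'
      intro hhead
      cases t with
      | nil => simp at hhead
      | cons d t' =>
        simp at hhead
        subst hhead
        exact hno ⟨[], t', by simp⟩

-- A's while-loop computes the collapsed form
lemma pvCollapseLoop_eq (s : List Char) : pvCollapseLoop s = pvCollapse s false := by
  induction s using pvCollapseLoop.induct with
  | case1 s hin ih =>
    rw [pvCollapseLoop, if_pos hin, ih, pvReplace_eq_pvRep, pvCollapse_pvRep]
  | case2 s hin =>
    rw [pvCollapseLoop, if_neg hin]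
    have hno : ¬ ['-', '-'] <:+: s := by
      intro hinf
      exact hin ((PySem.Chars.isIn_iff_infix _ _).mpr hinf)
    exact (pvCollapse_id s false hno (by simp)).symm

-- filter + collapse fused, as B's loop computes it
def pvSq : List Char → Bool → List Char
  | [], _ => []
  | c :: t, h =>
    if pvAllowedB.contains c = false then pvSq t h
    else if c = '-' ∧ h = true then pvSq t h
    else c :: pvSq t (c == '-')

lemma pvFold_inv (l : List Char) : ∀ (acc : List Char),
    l.foldl (fun acc c => if pvAllowedB.contains c = false then acc
      else if c = '-' ∧ acc.getLast? = some '-' then acc else acc ++ [c]) acc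
      = acc ++ pvSq l (acc.getLast? == some '-') := by
  induction l with
  | nil => intro acc; simp [pvSq]
  | cons c t ih =>
    intro acc
    rw [List.foldl_cons, pvSq]
    by_cases h1 : pvAllowedB.contains c = false
    · rw [if_pos h1, if_pos h1, ih]
    · rw [if_neg h1, if_neg h1]
      by_cases h2 : c = '-' ∧ acc.getLast? = some '-'
      · have hflag : (acc.getLast? == some '-') = true := by simp [h2.2]
        rw [if_pos h2, if_pos ⟨h2.1, hflag⟩, ih]
      · have hflag : ¬ (c = '-' ∧ (acc.getLast? == some '-') = true) := by
          intro ⟨hx, hy⟩; exact h2 ⟨hx, by simpa using hy⟩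
        rw [if_neg h2, if_neg hflag, ih]
        simp

lemma pvSq_filter (l : List Char) : ∀ h,
    pvSq l h = pvCollapse (l.filter (fun c => pvAllowedB.contains c)) h := by
  induction l with
  | nil => intro h; simp [pvSq, pvCollapse]
  | cons c t ih =>
    intro h
    rw [pvSq, List.filter_cons]
    by_cases h1 : pvAllowedB.contains c = false
    · rw [if_pos h1]
      simp only [h1, Bool.false_eq_true, if_false]
      exact ih h
    · rw [if_neg h1]
      have h1' : pvAllowedB.contains c = true := by simpa using h1
      simp only [h1', if_true]
      rw [pvCollapse]
      by_cases h2 : c = '-' ∧ h = true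
      · rw [if_pos h2, if_pos h2, ih]
      · rw [if_neg h2, if_neg h2, ih]

-- A's set and B's string hold the same characters
lemma pvAllowed_eq (c : Char) : pvAllowedA.contains c = pvAllowedB.contains c := by
  have : pvAllowedA = pvAllowedB := by decide
  rw [this]
  rfl

-- replace(" ", "-") is the character map ' ' → '-'
lemma pvSp_go (fuel : Nat) : ∀ (l acc : List Char), l.length ≤ fuel →
    PySem.Chars.replace.go [' '] ['-'] fuel l acc =
      acc.reverse ++ l.map (fun c => if c = ' ' then '-' else c) := by
  induction fuel with
  | zero =>
    intro l acc hl
    have : l = [] := List.eq_nil_of_length_eq_zero (Nat.le_zero.mp hl)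
    subst this
    simp [PySem.Chars.replace.go]
  | succ n ih =>
    intro l acc hl
    match l with
    | [] => simp [PySem.Chars.replace.go]
    | c :: t =>
      rw [PySem.Chars.replace.go]
      have hlen : t.length ≤ n := by simp at hl; omega
      by_cases hc : c = ' '
      · subst hc
        have hpre : List.isPrefixOf [' '] (' ' :: t) = true := by simp [List.isPrefixOf]
        rw [hpre]
        simp only [if_true]
        rw [show List.drop ([' '] : List Char).length (' ' :: t) = t from rfl]
        rw [ih t (['-'].reverse ++ acc) hlen]
        simp
      · have hpre : List.isPrefixOf [' '] (c :: t) = false := by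
          simp [List.isPrefixOf]
          exact fun h => hc h.symm
        rw [hpre]
        simp only [Bool.false_eq_true, if_false]
        rw [ih t (c :: acc) hlen]
        simp [hc]

lemma pvReplace_space (s : List Char) :
    PySem.Chars.replace s [' '] ['-'] = s.map (fun c => if c = ' ' then '-' else c) := by
  rw [PySem.Chars.replace]
  simp only [List.isEmpty_cons, Bool.false_eq_true, if_false]
  rw [pvSp_go s.length s [] (le_refl _)]
  simp

-- ===== VERDICT (by name: the statement is the Claim_ definition above) =====
theorem sanitize_branch_name_py_spec : Claim_equal_sanitize_branch_name_py := by
  intro title _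
  unfold Spec_sanitize_branch_name_py
  simp only [sanitize_branch_name_py, sanitize_branch_name_py_alt]
  have hcore : pvCollapseLoop
      ((PySem.Chars.replace (PySem.Chars.lower title.toList) [' '] ['-']).filter
        (fun c => pvAllowedA.contains c))
      = (PySem.Chars.lower title.toList).foldl pvStepB [] := by
    rw [pvReplace_space, pvCollapseLoop_eq]
    rw [show (fun c => pvAllowedA.contains c) = (fun c => pvAllowedB.contains c) from
      funext fun c => pvAllowed_eq c]
    rw [show (PySem.Chars.lower title.toList).foldl pvStepB [] =
        ((PySem.Chars.lower title.toList).map (fun c => if c = ' ' then '-' else c)).foldl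
          (fun acc c => if pvAllowedB.contains c = false then acc
            else if c = '-' ∧ acc.getLast? = some '-' then acc else acc ++ [c]) [] from by
      rw [List.foldl_map]
      rfl]
    rw [pvFold_inv]
    simp only [List.nil_append, List.getLast?_nil]
    rw [pvSq_filter]
    rfl
  rw [hcore]
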